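-- pv_equiv track=rewrite | github.com/724thomas/CodingChallenge_Python | baekjoon/19844.py | solution
-- ===== SOURCE A (Python) =====
-- def solution(s):
--     words = []
--     temp = ""
--     for c in s:
--         if c == " " or c == "-":
--             if temp:
--                 words.append(temp)
--             temp = ""
--         else:
--             temp += c
--     if temp:
--         words.append(temp)
--
--     vowels = {'a', 'e', 'i', 'o', 'u', 'h'}
--     ans = len(words)
--     for word in words:
--         if len(word) >= 4 and word[0] == "q" and word[1] == "u" and word[2] == "'" and word[3] in vowels:
--             ans += 1
--         elif len(word) >=3 and word[0] in "cjnmtsld" and word[1] == "'" and word[2] in vowels: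
--             ans += 1
--     return ans
-- ===== SOURCE B (Python) =====
-- def solution(s):
--     vowels = "aeiouh"
--     n = len(s)
--     ans = 0
--     i = 0
--     while i < n:
--         if s[i] == " " or s[i] == "-":
--             i += 1
--             continue
--         # word start: count the word and test the elision patterns in place
--         ans += 1
--         if i + 3 < n and s[i] == "q" and s[i+1] == "u" and s[i+2] == "'" and s[i+3] in vowels:
--             ans += 1
--         elif i + 2 < n and s[i] in "cjnmtsld" and s[i+1] == "'" and s[i+2] in vowels:
--             ans += 1
--         # skip to the end of the word
--         while i < n and s[i] != " " and s[i] != "-":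
--             i += 1
--     return ans
-- ===== Notes on version B (the rewrite author's own statement) =====
-- stated objective: alternative
-- what changed: B replaces A's two-phase design (materialise the list of words, then scan each word with length guards) by a single index-walk over s that counts a word and tests the elision patterns in place at each word start, with bounds guards against len(s) instead of word-length guards.
import Mathlib
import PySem

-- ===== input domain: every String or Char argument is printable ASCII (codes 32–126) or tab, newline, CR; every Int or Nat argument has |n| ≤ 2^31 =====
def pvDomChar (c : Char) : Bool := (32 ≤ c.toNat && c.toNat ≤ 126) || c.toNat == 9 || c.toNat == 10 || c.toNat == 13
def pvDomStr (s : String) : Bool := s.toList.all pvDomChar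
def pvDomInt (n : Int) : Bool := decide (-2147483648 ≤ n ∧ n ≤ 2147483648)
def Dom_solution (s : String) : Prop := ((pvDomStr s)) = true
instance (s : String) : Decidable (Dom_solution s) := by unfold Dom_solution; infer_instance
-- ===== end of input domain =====

-- B changes the decomposition: one in-place index scan instead of building the word list first
-- and scanning each word (objective: alternative; same asymptotic cost).

-- ===== PORT A =====
-- word[k] is only read under a length guard, so the guarded getD is exact
def pvBonusW (w : List Char) : Int :=
  if 4 ≤ w.length && w.getD 0 ' ' == 'q' && w.getD 1 ' ' == 'u' && w.getD 2 ' ' == '\'' &&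
      ['a','e','i','o','u','h'].contains (w.getD 3 ' ') then 1
  else if 3 ≤ w.length && "cjnmtsld".toList.contains (w.getD 0 ' ') && w.getD 1 ' ' == '\'' &&
      ['a','e','i','o','u','h'].contains (w.getD 2 ' ') then 1
  else 0

def pvStepA (st : List (List Char) × List Char) (c : Char) : List (List Char) × List Char :=
  if c == ' ' || c == '-' then
    (if st.2 ≠ [] then (st.1 ++ [st.2], []) else (st.1, []))
  else (st.1, st.2 ++ [c])

def solution (s : String) : Int :=
  let p := s.toList.foldl pvStepA ([], [])
  let words := if p.2 ≠ [] then p.1 ++ [p.2] else p.1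
  words.foldl (fun a w => a + pvBonusW w) (words.length : Int)

-- ===== PORT B =====
-- s[i+k] is only read under the guard i+k < n; on the suffix t = s[i:] that is k < t.length,
-- so the guarded getD is exact
def pvBonusS (t : List Char) : Int :=
  if 3 < t.length && t.getD 0 ' ' == 'q' && t.getD 1 ' ' == 'u' && t.getD 2 ' ' == '\'' &&
      ['a','e','i','o','u','h'].contains (t.getD 3 ' ') then 1
  else if 2 < t.length && "cjnmtsld".toList.contains (t.getD 0 ' ') && t.getD 1 ' ' == '\'' &&
      ['a','e','i','o','u','h'].contains (t.getD 2 ' ') then 1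
  else 0

-- the outer while-loop advancing index i, rendered as recursion on the suffix s[i:];
-- the inner word-skipping while-loop is dropWhile over the non-delimiter characters
def pvGoB (l : List Char) : Int :=
  match l with
  | [] => 0
  | c :: r =>
    if c == ' ' || c == '-' then pvGoB r
    else (1 + pvBonusS (c :: r)) + pvGoB (r.dropWhile (fun x => !(x == ' ' || x == '-')))
termination_by l.length
decreasing_by
  · simp
  · have h := List.length_dropWhile_le (fun x => !(x == ' ' || x == '-')) r
    simp only [List.length_cons]
    omega

def solution_alt (s : String) : Int := pvGoB s.toList

-- ===== PRECONDITION & SPEC =====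
def Spec_solution (s : String) (out : Int) : Prop := out = solution_alt s
instance (s : String) (out : Int) : Decidable (Spec_solution s out) := by unfold Spec_solution; infer_instance

-- ===== CLAIM (what is proved, stated in full; the proofs are below) =====
def Claim_equal_solution : Prop := ∀ (s : String), Dom_solution s → Spec_solution s (solution s)

-- ===== LEMMAS AND PROOFS =====

def pvND (c : Char) : Bool := !(c == ' ' || c == '-')

-- the tokeniser of A, written as structural recursion carrying the pending word
def pvTokens (temp : List Char) : List Char → List (List Char)
  | [] => if temp = [] then [] else [temp]
  | c :: r =>
    if c == ' ' || c == '-' then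
      (if temp = [] then pvTokens [] r else temp :: pvTokens [] r)
    else pvTokens (temp ++ [c]) r

theorem foldA_tokens (l : List Char) (ws : List (List Char)) (temp : List Char) :
    (if (l.foldl pvStepA (ws, temp)).2 ≠ [] then
        (l.foldl pvStepA (ws, temp)).1 ++ [(l.foldl pvStepA (ws, temp)).2]
      else (l.foldl pvStepA (ws, temp)).1) = ws ++ pvTokens temp l := by
  induction l generalizing ws temp with
  | nil =>
    by_cases ht : temp = [] <;> simp [pvTokens, ht]
  | cons c r ih =>
    simp only [List.foldl_cons, pvStepA]
    by_cases hc : (c == ' ' || c == '-') = true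
    · rw [if_pos hc]
      by_cases ht : temp = []
      · subst ht
        simpa [pvTokens, hc] using ih ws []
      · rw [if_pos ht]
        have := ih (ws ++ [temp]) []
        simp only [List.append_assoc] at this
        simpa [pvTokens, hc, ht] using this
    · rw [if_neg hc]
      simpa [pvTokens, hc] using ih ws (temp ++ [c])

theorem count_foldl (ts : List (List Char)) (a : Int) :
    ts.foldl (fun a w => a + pvBonusW w) a = a + (ts.map pvBonusW).sum := by
  induction ts generalizing a with
  | nil => simp
  | cons w ts ih => simp [ih, add_assoc]

theorem tokens_word (r : List Char) (temp : List Char) (h : temp ≠ []) :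
    pvTokens temp r = (temp ++ r.takeWhile pvND) :: pvTokens [] (r.dropWhile pvND) := by
  induction r generalizing temp with
  | nil => simp [pvTokens, h]
  | cons c r ih =>
    by_cases hc : (c == ' ' || c == '-') = true
    · have hnd : pvND c = false := by simp [pvND, hc]
      simp [pvTokens, hc, h, hnd]
    · have hnd : pvND c = true := by simp [pvND]; simpa using hc
      have := ih (temp ++ [c]) (by simp)
      simp [pvTokens, hc, hnd, this]

-- a delimiter character fails every test the elision patterns make
theorem bonus_bridge (c : Char) (r : List Char) (_hc : (c == ' ' || c == '-') = false) :
    pvBonusS (c :: r) = pvBonusW (c :: r.takeWhile pvND) := by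
  rcases r with _ | ⟨a, r2⟩
  · simp [pvBonusS, pvBonusW]
  by_cases ha : (a == ' ' || a == '-') = true
  · have ha' : a = ' ' ∨ a = '-' := by simpa using ha
    have hnd : pvND a = false := by simp [pvND, ha]
    rcases ha' with h | h <;> subst h <;>
      simp [pvBonusS, pvBonusW, hnd]
  · have hnda : pvND a = true := by simp [pvND]; simpa using ha
    rcases r2 with _ | ⟨b, r3⟩
    · simp [pvBonusS, pvBonusW, hnda]
    by_cases hb : (b == ' ' || b == '-') = true
    · have hb' : b = ' ' ∨ b = '-' := by simpa using hb
      have hndb : pvND b = false := by simp [pvND, hb]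
      rcases hb' with h | h <;> subst h <;>
        simp [pvBonusS, pvBonusW, hnda, hndb]
    · have hndb : pvND b = true := by simp [pvND]; simpa using hb
      rcases r3 with _ | ⟨d, r4⟩
      · simp [pvBonusS, pvBonusW, hnda, hndb]
      by_cases hd : (d == ' ' || d == '-') = true
      · have hd' : d = ' ' ∨ d = '-' := by simpa using hd
        have hndd : pvND d = false := by simp [pvND, hd]
        rcases hd' with h | h <;> subst h <;>
          simp [pvBonusS, pvBonusW, hnda, hndb, hndd]
      · have hndd : pvND d = true := by simp [pvND]; simpa using hd
        simp [pvBonusS, pvBonusW, hnda, hndb, hndd]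

theorem goB_count (l : List Char) :
    pvGoB l = ((pvTokens [] l).length : Int) + ((pvTokens [] l).map pvBonusW).sum := by
  induction l using pvGoB.induct with
  | case1 => simp [pvGoB, pvTokens]
  | case2 c r hc ih =>
    simp [pvGoB, pvTokens, hc, ih]
  | case3 c r hc ih =>
    have hc' : (c == ' ' || c == '-') = false := by simpa using hc
    rw [pvGoB]
    rw [if_neg (by simp [hc'])]
    have htok : pvTokens [] (c :: r)
        = (c :: r.takeWhile pvND) :: pvTokens [] (r.dropWhile pvND) := by
      simp [pvTokens, hc']
      simpa using tokens_word r [c] (by simp)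
    have hdw : r.dropWhile (fun x => !(x == ' ' || x == '-')) = r.dropWhile pvND := rfl
    rw [hdw] at ih ⊢
    rw [htok, ih, bonus_bridge c r hc']
    simp [List.map_cons, List.sum_cons]
    ring

theorem solutionA_count (s : String) :
    solution s = ((pvTokens [] s.toList).length : Int)
      + ((pvTokens [] s.toList).map pvBonusW).sum := by
  unfold solution
  rw [count_foldl]
  rw [foldA_tokens s.toList [] []]
  simp

-- ===== VERDICT (by name: the statement is the Claim_ definition above) =====
theorem solution_spec : Claim_equal_solution := by
  intro s _
  unfold Spec_solution solution_alt
  rw [solutionA_count, goB_count]
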